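-- pv_equiv track=rewrite | github.com/openlandmap/scikit-map | predict_api.py | _get_out_files_depths
-- ===== SOURCE A (Python) =====
-- def _get_out_files_depths(out_files_prefix, out_files_suffix, tile_id, depths, num_depths, years, num_years, num_stats):
--     assert(len(out_files_prefix) == len(out_files_suffix))
--     assert(len(out_files_prefix) == num_stats)
--     assert(len(depths) >= num_depths)
--     assert(len(years) >= num_years)
--     out_files = []
--     for i in range(num_depths):
--         for k in range(num_stats):
--             for j in range(num_years):
--                 if num_years < len(years):
--                     y1 = years[j]
--                     y2 = years[j + len(years) - num_years]
--                     if num_depths < len(depths):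
--                         d1 = depths[i]
--                         d2 = depths[i + len(depths) - num_depths]
--                         file = f'{out_files_prefix[k]}_b{d1}cm..{d2}cm_{y1}0101_{y2}1231_tile.{tile_id}_{out_files_suffix[k]}'
--                     else:
--                         d1 = depths[i]
--                         file = f'{out_files_prefix[k]}_b{d1}cm_{y1}0101_{y2}1231_tile.{tile_id}_{out_files_suffix[k]}'
--                 else:
--                     y1 = years[j]
--                     if num_depths < len(depths):
--                         d1 = depths[i]
--                         d2 = depths[i + len(depths) - num_depths]
--                         file = f'{out_files_prefix[k]}_b{d1}cm..{d2}cm_{y1}0101_{y1}1231_tile.{tile_id}_{out_files_suffix[k]}'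
--                     else:
--                         d1 = depths[i]
--                         file = f'{out_files_prefix[k]}_b{d1}cm_{y1}0101_{y1}1231_tile.{tile_id}_{out_files_suffix[k]}'
--                 out_files.append(file)
--     return out_files
-- ===== SOURCE B (Python) =====
-- def _get_out_files_depths(out_files_prefix, out_files_suffix, tile_id, depths, num_depths, years, num_years, num_stats):
--     assert(len(out_files_prefix) == len(out_files_suffix))
--     assert(len(out_files_prefix) == num_stats)
--     assert(len(depths) >= num_depths)
--     assert(len(years) >= num_years)
--     if num_depths < len(depths):
--         depth_seg = [f'b{depths[i]}cm..{depths[i + len(depths) - num_depths]}cm' for i in range(num_depths)]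
--     else:
--         depth_seg = [f'b{d}cm' for d in depths]
--     if num_years < len(years):
--         year_seg = [f'{years[j]}0101_{years[j + len(years) - num_years]}1231' for j in range(num_years)]
--     else:
--         year_seg = [f'{y}0101_{y}1231' for y in years]
--     ny = len(year_seg)
--     blk = num_stats * ny
--     out_files = []
--     for t in range(len(depth_seg) * blk):
--         i, r = divmod(t, blk)
--         k, j = divmod(r, ny)
--         out_files.append(f'{out_files_prefix[k]}_{depth_seg[i]}_{year_seg[j]}_tile.{tile_id}_{out_files_suffix[k]}')
--     return out_files
-- ===== Notes on version B (the rewrite author's own statement) =====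
-- stated objective: alternative
-- what changed: B replaces A's triple nested loop (which re-decides the two invariant branches per file) by a single flat loop over one counter t over the product size, recovering the (depth, stat, year) coordinates with divmod and reading precomputed depth-segment and year-segment string tables.
import Mathlib
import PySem

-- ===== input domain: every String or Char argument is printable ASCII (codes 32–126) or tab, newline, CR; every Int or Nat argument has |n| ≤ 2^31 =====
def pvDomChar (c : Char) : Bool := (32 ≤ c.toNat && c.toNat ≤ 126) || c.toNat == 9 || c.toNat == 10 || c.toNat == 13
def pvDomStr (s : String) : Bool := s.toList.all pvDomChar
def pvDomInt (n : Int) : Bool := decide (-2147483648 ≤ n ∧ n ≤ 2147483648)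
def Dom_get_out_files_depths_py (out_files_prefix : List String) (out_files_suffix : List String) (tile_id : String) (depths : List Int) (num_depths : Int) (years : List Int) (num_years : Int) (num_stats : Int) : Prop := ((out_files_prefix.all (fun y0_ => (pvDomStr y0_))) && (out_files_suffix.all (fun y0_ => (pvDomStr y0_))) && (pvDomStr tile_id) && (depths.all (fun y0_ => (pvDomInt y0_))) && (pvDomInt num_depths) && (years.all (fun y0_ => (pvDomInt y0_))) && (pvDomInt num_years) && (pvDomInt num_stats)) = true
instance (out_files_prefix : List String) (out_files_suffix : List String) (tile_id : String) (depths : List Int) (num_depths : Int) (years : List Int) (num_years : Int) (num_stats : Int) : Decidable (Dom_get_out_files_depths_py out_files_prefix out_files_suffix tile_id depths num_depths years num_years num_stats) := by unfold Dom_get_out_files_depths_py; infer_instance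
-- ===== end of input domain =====

-- B replaces A's branching triple loop by one flat counter loop over the product size: it precomputes
-- the depth-segment and year-segment string tables once, then recovers (i, k, j) from the counter with
-- divmod; objective: alternative decomposition. Same return value on all inputs passing A's asserts.
-- ===== PORT A =====
-- Port of A: triple index loop with the year/depth branches re-decided inside the innermost body.
-- pyGetD (default 0 / "") is exact here: under Pre_ every index the loops produce is in range.
def get_out_files_depths_py (out_files_prefix : List String) (out_files_suffix : List String) (tile_id : String) (depths : List Int) (num_depths : Int) (years : List Int) (num_years : Int) (num_stats : Int) : List String :=
  if out_files_prefix.length = out_files_suffix.length ∧ (out_files_prefix.length : Int) = num_stats ∧ num_depths ≤ (depths.length : Int) ∧ num_years ≤ (years.length : Int) then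
    (PySem.List.pyRange 0 num_depths 1).foldl (fun acc i =>
      (PySem.List.pyRange 0 num_stats 1).foldl (fun acc k =>
        (PySem.List.pyRange 0 num_years 1).foldl (fun acc j =>
          let file :=
            if num_years < (years.length : Int) then
              let y1 := PySem.List.pyGetD years j 0
              let y2 := PySem.List.pyGetD years (j + (years.length : Int) - num_years) 0
              if num_depths < (depths.length : Int) then
                let d1 := PySem.List.pyGetD depths i 0
                let d2 := PySem.List.pyGetD depths (i + (depths.length : Int) - num_depths) 0
                PySem.List.pyGetD out_files_prefix k "" ++ "_b" ++ PySem.Int.toStr d1 ++ "cm.." ++ PySem.Int.toStr d2 ++ "cm_" ++ PySem.Int.toStr y1 ++ "0101_" ++ PySem.Int.toStr y2 ++ "1231_tile." ++ tile_id ++ "_" ++ PySem.List.pyGetD out_files_suffix k ""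
              else
                let d1 := PySem.List.pyGetD depths i 0
                PySem.List.pyGetD out_files_prefix k "" ++ "_b" ++ PySem.Int.toStr d1 ++ "cm_" ++ PySem.Int.toStr y1 ++ "0101_" ++ PySem.Int.toStr y2 ++ "1231_tile." ++ tile_id ++ "_" ++ PySem.List.pyGetD out_files_suffix k ""
            else
              let y1 := PySem.List.pyGetD years j 0
              if num_depths < (depths.length : Int) then
                let d1 := PySem.List.pyGetD depths i 0
                let d2 := PySem.List.pyGetD depths (i + (depths.length : Int) - num_depths) 0
                PySem.List.pyGetD out_files_prefix k "" ++ "_b" ++ PySem.Int.toStr d1 ++ "cm.." ++ PySem.Int.toStr d2 ++ "cm_" ++ PySem.Int.toStr y1 ++ "0101_" ++ PySem.Int.toStr y1 ++ "1231_tile." ++ tile_id ++ "_" ++ PySem.List.pyGetD out_files_suffix k ""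
              else
                let d1 := PySem.List.pyGetD depths i 0
                PySem.List.pyGetD out_files_prefix k "" ++ "_b" ++ PySem.Int.toStr d1 ++ "cm_" ++ PySem.Int.toStr y1 ++ "0101_" ++ PySem.Int.toStr y1 ++ "1231_tile." ++ tile_id ++ "_" ++ PySem.List.pyGetD out_files_suffix k ""
          acc ++ [file]) acc) acc) []
  else []

-- ===== PORT B =====
-- B's segment tables, computed once before the single loop.
def pvDepthSegs (depths : List Int) (num_depths : Int) : List String :=
  if num_depths < (depths.length : Int) then
    (PySem.List.pyRange 0 num_depths 1).map (fun i =>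
      "b" ++ PySem.Int.toStr (PySem.List.pyGetD depths i 0) ++ "cm.." ++ PySem.Int.toStr (PySem.List.pyGetD depths (i + (depths.length : Int) - num_depths) 0) ++ "cm")
  else
    depths.map (fun d => "b" ++ PySem.Int.toStr d ++ "cm")

def pvYearSegs (years : List Int) (num_years : Int) : List String :=
  if num_years < (years.length : Int) then
    (PySem.List.pyRange 0 num_years 1).map (fun j =>
      PySem.Int.toStr (PySem.List.pyGetD years j 0) ++ "0101_" ++ PySem.Int.toStr (PySem.List.pyGetD years (j + (years.length : Int) - num_years) 0) ++ "1231")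
  else
    years.map (fun y => PySem.Int.toStr y ++ "0101_" ++ PySem.Int.toStr y ++ "1231")

-- One flat loop over the counter t; (i, k, j) recovered by divmod. The divmod divisors are nonzero
-- whenever the loop body runs (total > 0 forces blk > 0 and ny > 0), matching Python.
def get_out_files_depths_py_alt (out_files_prefix : List String) (out_files_suffix : List String) (tile_id : String) (depths : List Int) (num_depths : Int) (years : List Int) (num_years : Int) (num_stats : Int) : List String :=
  if out_files_prefix.length = out_files_suffix.length ∧ (out_files_prefix.length : Int) = num_stats ∧ num_depths ≤ (depths.length : Int) ∧ num_years ≤ (years.length : Int) then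
    let depth_seg := pvDepthSegs depths num_depths
    let year_seg := pvYearSegs years num_years
    let ny : Int := (year_seg.length : Int)
    let blk : Int := num_stats * ny
    (PySem.List.pyRange 0 ((depth_seg.length : Int) * blk) 1).foldl (fun acc t =>
      let i := PySem.Int.floordiv t blk
      let r := PySem.Int.mod t blk
      let k := PySem.Int.floordiv r ny
      let j := PySem.Int.mod r ny
      acc ++ [PySem.List.pyGetD out_files_prefix k "" ++ "_" ++ PySem.List.pyGetD depth_seg i "" ++ "_" ++ PySem.List.pyGetD year_seg j "" ++ "_tile." ++ tile_id ++ "_" ++ PySem.List.pyGetD out_files_suffix k ""]) []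
  else []

-- ===== PRECONDITION & SPEC =====
-- Pre_ = exactly the four asserts of the Python; on any other input A raises AssertionError.
def Pre_get_out_files_depths_py (out_files_prefix : List String) (out_files_suffix : List String) (tile_id : String) (depths : List Int) (num_depths : Int) (years : List Int) (num_years : Int) (num_stats : Int) : Prop :=
  out_files_prefix.length = out_files_suffix.length ∧ (out_files_prefix.length : Int) = num_stats ∧ num_depths ≤ (depths.length : Int) ∧ num_years ≤ (years.length : Int)
instance (out_files_prefix : List String) (out_files_suffix : List String) (tile_id : String) (depths : List Int) (num_depths : Int) (years : List Int) (num_years : Int) (num_stats : Int) : Decidable (Pre_get_out_files_depths_py out_files_prefix out_files_suffix tile_id depths num_depths years num_years num_stats) := by unfold Pre_get_out_files_depths_py; infer_instance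
def pvWitness_get_out_files_depths_py : List String × List String × String × List Int × Int × List Int × Int × Int :=
  (["p0"], ["s0"], "T", [0, 10], 1, [2000, 2001], 1, 1)
def Spec_get_out_files_depths_py (out_files_prefix : List String) (out_files_suffix : List String) (tile_id : String) (depths : List Int) (num_depths : Int) (years : List Int) (num_years : Int) (num_stats : Int) (out : List String) : Prop := out = get_out_files_depths_py_alt out_files_prefix out_files_suffix tile_id depths num_depths years num_years num_stats
instance (out_files_prefix : List String) (out_files_suffix : List String) (tile_id : String) (depths : List Int) (num_depths : Int) (years : List Int) (num_years : Int) (num_stats : Int) (out : List String) : Decidable (Spec_get_out_files_depths_py out_files_prefix out_files_suffix tile_id depths num_depths years num_years num_stats out) := by unfold Spec_get_out_files_depths_py; infer_instance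

-- ===== CLAIM (what is proved, stated in full; the proofs are below) =====
def Claim_equal_get_out_files_depths_py : Prop := ∀ (out_files_prefix : List String) (out_files_suffix : List String) (tile_id : String) (depths : List Int) (num_depths : Int) (years : List Int) (num_years : Int) (num_stats : Int), Dom_get_out_files_depths_py out_files_prefix out_files_suffix tile_id depths num_depths years num_years num_stats → Pre_get_out_files_depths_py out_files_prefix out_files_suffix tile_id depths num_depths years num_years num_stats → Spec_get_out_files_depths_py out_files_prefix out_files_suffix tile_id depths num_depths years num_years num_stats (get_out_files_depths_py out_files_prefix out_files_suffix tile_id depths num_depths years num_years num_stats)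

-- ===== LEMMAS AND PROOFS =====

theorem pvWitness_ok : Dom_get_out_files_depths_py (pvWitness_get_out_files_depths_py.1) (pvWitness_get_out_files_depths_py.2.1) (pvWitness_get_out_files_depths_py.2.2.1) (pvWitness_get_out_files_depths_py.2.2.2.1) (pvWitness_get_out_files_depths_py.2.2.2.2.1) (pvWitness_get_out_files_depths_py.2.2.2.2.2.1) (pvWitness_get_out_files_depths_py.2.2.2.2.2.2.1) (pvWitness_get_out_files_depths_py.2.2.2.2.2.2.2) ∧ Pre_get_out_files_depths_py (pvWitness_get_out_files_depths_py.1) (pvWitness_get_out_files_depths_py.2.1) (pvWitness_get_out_files_depths_py.2.2.1) (pvWitness_get_out_files_depths_py.2.2.2.1) (pvWitness_get_out_files_depths_py.2.2.2.2.1) (pvWitness_get_out_files_depths_py.2.2.2.2.2.1) (pvWitness_get_out_files_depths_py.2.2.2.2.2.2.1) (pvWitness_get_out_files_depths_py.2.2.2.2.2.2.2) := by decide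

-- the common flatMap normal form both ports are reduced to
def pvMid (out_files_prefix : List String) (out_files_suffix : List String) (tile_id : String) (depth_seg year_seg : List String) : List String :=
  depth_seg.flatMap (fun ds =>
    (out_files_prefix.zip out_files_suffix).flatMap (fun ps =>
      year_seg.map (fun ys =>
        ps.1 ++ "_" ++ ds ++ "_" ++ ys ++ "_tile." ++ tile_id ++ "_" ++ ps.2)))

-- the four string shapes: A's flat f-string equals the segment-composed one (pure reassociation)
theorem strShape1 (pk sk a b c d tid : String) :
    pk ++ "_b" ++ a ++ "cm.." ++ b ++ "cm_" ++ c ++ "0101_" ++ d ++ "1231_tile." ++ tid ++ "_" ++ sk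
    = pk ++ "_" ++ ("b" ++ a ++ "cm.." ++ b ++ "cm") ++ "_" ++ (c ++ "0101_" ++ d ++ "1231") ++ "_tile." ++ tid ++ "_" ++ sk := by
  apply String.ext; simp

theorem strShape2 (pk sk a c d tid : String) :
    pk ++ "_b" ++ a ++ "cm_" ++ c ++ "0101_" ++ d ++ "1231_tile." ++ tid ++ "_" ++ sk
    = pk ++ "_" ++ ("b" ++ a ++ "cm") ++ "_" ++ (c ++ "0101_" ++ d ++ "1231") ++ "_tile." ++ tid ++ "_" ++ sk := by
  apply String.ext; simp

-- a list equals the pyRange-indexed comprehension over it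
theorem self_eq_map_pyRange {alpha : Type} (xs : List alpha) (d : alpha) :
    xs = (PySem.List.pyRange 0 (xs.length : Int) 1).map (fun j => PySem.List.pyGetD xs j d) := by
  apply List.ext_getElem
  · simp [PySem.List.length_pyRange_one]
  · intro k h1 h2
    simp [PySem.List.getElem_pyRange_one, PySem.List.pyGetD_natCast, List.getD_eq_getElem?_getD, h1]

-- zip of two equal-length lists as the index comprehension the k-loop produces
theorem zip_eq_map_pyRange (p s : List String) (hl : p.length = s.length) :
    p.zip s = (PySem.List.pyRange 0 (p.length : Int) 1).map (fun k => (PySem.List.pyGetD p k "", PySem.List.pyGetD s k "")) := by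
  apply List.ext_getElem
  · simp [PySem.List.length_pyRange_one, hl]
  · intro k h1 h2
    have hk : k < p.length := by simp [List.length_zip] at h1; omega
    have hk' : k < s.length := by omega
    simp [List.getElem_zip, PySem.List.getElem_pyRange_one, PySem.List.pyGetD_natCast,
      List.getD_eq_getElem?_getD, hk, hk']

-- a mapped list as the pyRange-indexed comprehension
theorem map_eq_map_pyRange {alpha beta : Type} (xs : List alpha) (d : alpha) (g : alpha → beta) :
    xs.map g = (PySem.List.pyRange 0 (xs.length : Int) 1).map (fun j => g (PySem.List.pyGetD xs j d)) := by
  conv_lhs => rw [self_eq_map_pyRange xs d]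
  simp [List.map_map, Function.comp]

-- A reduces to pvMid (the old equivalence, reused as the A-side half)
theorem a_eq_mid (p s : List String) (tid : String) (depths : List Int) (nd : Int) (years : List Int) (ny : Int) (ns : Int)
    (h1 : p.length = s.length) (h2 : (p.length : Int) = ns) (h3 : nd ≤ (depths.length : Int)) (h4 : ny ≤ (years.length : Int)) :
    get_out_files_depths_py p s tid depths nd years ny ns
      = pvMid p s tid (pvDepthSegs depths nd) (pvYearSegs years ny) := by
  unfold get_out_files_depths_py pvMid
  rw [if_pos ⟨h1, h2, h3, h4⟩]
  simp only [PySem.List.foldl_append_singleton_eq_map, PySem.List.foldl_append_eq_flatMap,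
    List.nil_append]
  rw [zip_eq_map_pyRange p s h1, h2]
  by_cases hy : ny < (years.length : Int) <;> by_cases hd : nd < (depths.length : Int)
  · simp only [pvDepthSegs, pvYearSegs, hy, hd, if_true,
      List.flatMap_map, List.map_map, Function.comp_def]
    simp only [strShape1]
  · have hnd : (depths.length : Int) = nd := le_antisymm (not_lt.1 hd) h3
    simp only [pvDepthSegs, pvYearSegs, hy, if_true, if_false,
      map_eq_map_pyRange depths 0, hnd, List.flatMap_map, List.map_map, Function.comp_def, lt_self_iff_false]
    simp only [strShape2]
  · have hny : (years.length : Int) = ny := le_antisymm (not_lt.1 hy) h4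
    simp only [pvDepthSegs, pvYearSegs, hd, if_true, if_false,
      map_eq_map_pyRange years 0, hny, List.flatMap_map, List.map_map, Function.comp_def, lt_self_iff_false]
    simp only [strShape1]
  · have hnd : (depths.length : Int) = nd := le_antisymm (not_lt.1 hd) h3
    have hny : (years.length : Int) = ny := le_antisymm (not_lt.1 hy) h4
    simp only [pvDepthSegs, pvYearSegs, if_false,
      map_eq_map_pyRange depths 0, map_eq_map_pyRange years 0, hnd, hny,
      List.flatMap_map, List.map_map, Function.comp_def, lt_self_iff_false]
    simp only [strShape2]

-- flat-counter decomposition: one range over n*N with div/mod recovers the flatMap over xs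
theorem range_mul_map {alpha delta : Type} (N : Nat) (h : alpha → Nat → delta) (dx : alpha) :
    ∀ (xs : List alpha),
      (List.range (xs.length * N)).map (fun t => h (xs.getD (t / N) dx) (t % N))
        = xs.flatMap (fun x => (List.range N).map (h x))
  | [] => by simp
  | x :: tl => by
    rcases Nat.eq_zero_or_pos N with hN | hN
    · simp [hN]
    · have hsplit : (x :: tl).length * N = N + tl.length * N := by
        simp [List.length_cons]; ring
      rw [hsplit, List.range_add, List.map_append, List.map_map, List.flatMap_cons]
      congr 1
      · apply List.map_congr_left; intro t ht
        have htN : t < N := List.mem_range.mp ht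
        simp [Nat.div_eq_of_lt htN, Nat.mod_eq_of_lt htN]
      · have hfun : ((fun t => h ((x :: tl).getD (t / N) dx) (t % N)) ∘ fun i => N + i)
            = (fun t => h (tl.getD (t / N) dx) (t % N)) := by
          funext t
          have hdiv : (N + t) / N = t / N + 1 := by
            rw [Nat.add_comm, Nat.add_div_right _ hN]
          have hmod : (N + t) % N = t % N := Nat.add_mod_left N t
          simp [hdiv, hmod]
        rw [hfun, range_mul_map N h dx tl]

-- pyRange over a Nat-cast bound is the casted List.range
theorem pyRange_natCast (n : Nat) :
    PySem.List.pyRange 0 (n : Int) 1 = (List.range n).map (fun t : Nat => (t : Int)) := by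
  rw [PySem.List.pyRange_one]
  simp

-- getD via pyGetD on a Nat-cast index
theorem pyGetD_cast {alpha : Type} (xs : List alpha) (k : Nat) (d : alpha) :
    PySem.List.pyGetD xs (k : Int) d = xs.getD k d := by
  simp [PySem.List.pyGetD_natCast, List.getD_eq_getElem?_getD]

-- prefix/suffix getD agree with the zip's components at every index (equal lengths)
theorem getD_zip_fst (p s : List String) (hl : p.length = s.length) (k : Nat) :
    p.getD k "" = ((p.zip s).getD k ("", "")).1 := by
  by_cases hk : k < p.length
  · have hk2 : k < (p.zip s).length := by simp [List.length_zip]; omega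
    rw [List.getD_eq_getElem _ _ hk, List.getD_eq_getElem _ _ hk2, List.getElem_zip]
  · have hk2 : ¬ k < (p.zip s).length := by simp [List.length_zip]; omega
    rw [List.getD_eq_default _ _ (by omega), List.getD_eq_default _ _ (by simp [List.length_zip]; omega)]

theorem getD_zip_snd (p s : List String) (hl : p.length = s.length) (k : Nat) :
    s.getD k "" = ((p.zip s).getD k ("", "")).2 := by
  by_cases hk : k < s.length
  · have hk2 : k < (p.zip s).length := by simp [List.length_zip]; omega
    rw [List.getD_eq_getElem _ _ hk, List.getD_eq_getElem _ _ hk2, List.getElem_zip]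
  · have hk2 : ¬ k < (p.zip s).length := by simp [List.length_zip]; omega
    rw [List.getD_eq_default _ _ (by omega), List.getD_eq_default _ _ (by simp [List.length_zip]; omega)]

-- a map over range of getD is the map over the list itself
theorem map_range_getD {alpha beta : Type} (xs : List alpha) (d : alpha) (g : alpha → beta) :
    (List.range xs.length).map (fun j => g (xs.getD j d)) = xs.map g := by
  apply List.ext_getElem
  · simp
  · intro k h1 h2
    have hk : k < xs.length := by simpa using h1
    simp [List.getD_eq_getElem?_getD, List.getElem?_eq_getElem hk]

-- B reduces to pvMid
theorem b_eq_mid (p s : List String) (tid : String) (depths : List Int) (nd : Int) (years : List Int) (ny : Int) (ns : Int)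
    (h1 : p.length = s.length) (h2 : (p.length : Int) = ns) (h3 : nd ≤ (depths.length : Int)) (h4 : ny ≤ (years.length : Int)) :
    get_out_files_depths_py_alt p s tid depths nd years ny ns
      = pvMid p s tid (pvDepthSegs depths nd) (pvYearSegs years ny) := by
  unfold get_out_files_depths_py_alt
  rw [if_pos ⟨h1, h2, h3, h4⟩]
  simp only [PySem.List.foldl_append_singleton_eq_map, List.nil_append]
  set dseg := pvDepthSegs depths nd with hdseg
  set yseg := pvYearSegs years ny with hyseg
  have hlz : (p.zip s).length = p.length := by simp [List.length_zip, h1]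
  have hblk : ns * (yseg.length : Int) = (((p.zip s).length * yseg.length : Nat) : Int) := by
    push_cast [hlz, ← h2]; ring
  have htot : (dseg.length : Int) * (ns * (yseg.length : Int))
      = ((dseg.length * ((p.zip s).length * yseg.length) : Nat) : Int) := by
    push_cast [hlz, ← h2]; ring
  rw [htot, pyRange_natCast, List.map_map]
  have hbody : ((fun t : Int =>
        PySem.List.pyGetD p (PySem.Int.floordiv (PySem.Int.mod t (ns * (yseg.length : Int))) (yseg.length : Int)) "" ++ "_" ++
        PySem.List.pyGetD dseg (PySem.Int.floordiv t (ns * (yseg.length : Int))) "" ++ "_" ++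
        PySem.List.pyGetD yseg (PySem.Int.mod (PySem.Int.mod t (ns * (yseg.length : Int))) (yseg.length : Int)) "" ++ "_tile." ++ tid ++ "_" ++
        PySem.List.pyGetD s (PySem.Int.floordiv (PySem.Int.mod t (ns * (yseg.length : Int))) (yseg.length : Int)) "") ∘ (fun t : Nat => ((t : Int))))
      = (fun t : Nat =>
          (fun (ds : String) (r : Nat) =>
            ((p.zip s).getD (r / yseg.length) ("", "")).1 ++ "_" ++ ds ++ "_" ++
              (yseg.getD (r % yseg.length) "") ++ "_tile." ++ tid ++ "_" ++
              ((p.zip s).getD (r / yseg.length) ("", "")).2)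
          (dseg.getD (t / ((p.zip s).length * yseg.length)) "") (t % ((p.zip s).length * yseg.length))) := by
    funext t
    simp only [Function.comp_apply, hblk, PySem.Int.floordiv_natCast, PySem.Int.mod_natCast,
      pyGetD_cast, getD_zip_fst p s h1, getD_zip_snd p s h1]
  rw [hbody, range_mul_map ((p.zip s).length * yseg.length)
        (fun (ds : String) (r : Nat) =>
          ((p.zip s).getD (r / yseg.length) ("", "")).1 ++ "_" ++ ds ++ "_" ++
            (yseg.getD (r % yseg.length) "") ++ "_tile." ++ tid ++ "_" ++
            ((p.zip s).getD (r / yseg.length) ("", "")).2) "" dseg]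
  unfold pvMid
  have hinner : (fun ds : String =>
      (List.range ((p.zip s).length * yseg.length)).map
        (fun r =>
          ((p.zip s).getD (r / yseg.length) ("", "")).1 ++ "_" ++ ds ++ "_" ++
            (yseg.getD (r % yseg.length) "") ++ "_tile." ++ tid ++ "_" ++
            ((p.zip s).getD (r / yseg.length) ("", "")).2))
      = (fun ds : String =>
          (p.zip s).flatMap (fun ps =>
            yseg.map (fun ys => ps.1 ++ "_" ++ ds ++ "_" ++ ys ++ "_tile." ++ tid ++ "_" ++ ps.2))) := by
    funext ds
    rw [range_mul_map yseg.length
          (fun (ps : String × String) (j : Nat) =>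
            ps.1 ++ "_" ++ ds ++ "_" ++ (yseg.getD j "") ++ "_tile." ++ tid ++ "_" ++ ps.2)
          ("", "") (p.zip s)]
    have hy : (fun ps : String × String =>
        (List.range yseg.length).map (fun j =>
          ps.1 ++ "_" ++ ds ++ "_" ++ (yseg.getD j "") ++ "_tile." ++ tid ++ "_" ++ ps.2))
        = (fun ps : String × String =>
            yseg.map (fun ys => ps.1 ++ "_" ++ ds ++ "_" ++ ys ++ "_tile." ++ tid ++ "_" ++ ps.2)) := by
      funext ps
      exact map_range_getD yseg ""
        (fun ys => ps.1 ++ "_" ++ ds ++ "_" ++ ys ++ "_tile." ++ tid ++ "_" ++ ps.2)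
    rw [hy]
  rw [hinner]

-- ===== VERDICT (by name: the statement is the Claim_ definition above) =====
set_option maxHeartbeats 1000000 in
theorem get_out_files_depths_py_spec : Claim_equal_get_out_files_depths_py := by
  intro p s tid depths nd years ny ns _ hpre
  obtain ⟨h1, h2, h3, h4⟩ := hpre
  unfold Spec_get_out_files_depths_py
  rw [a_eq_mid p s tid depths nd years ny ns h1 h2 h3 h4,
      b_eq_mid p s tid depths nd years ny ns h1 h2 h3 h4]
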